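-- pv_equiv track=rewrite | github.com/Drayton80/DL-HistoricalMapSegmentation | chunk.py | boundaries
-- ===== SOURCE A (Python) =====
-- from typing import List, Tuple
--
-- def boundaries(tiles_per_image:List[int], max_chunk_size:int) -> Tuple[List[Tuple[int, int]], List[Tuple[int, int]]]:
--     boundaries_images = []
--     bondaries_tiles = []
--     tiles_sum = 0
--     tiles_sum_accumulative = 0
--
--     for idx, tiles_number in enumerate(tiles_per_image):
--         tiles_sum += tiles_number
--         tiles_sum_accumulative += tiles_number
--         if tiles_sum > max_chunk_size or idx + 1 == len(tiles_per_image):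
--             tiles_sum = 0
--             boundaries_images.append((boundaries_images[-1][1]+1, idx) if len(boundaries_images) > 0 else (0, idx))
--             bondaries_tiles.append((bondaries_tiles[-1][1]+1, tiles_sum_accumulative) if len(bondaries_tiles) > 0 else (0, tiles_sum_accumulative))
--
--     return boundaries_images, bondaries_tiles
-- ===== SOURCE B (Python) =====
-- def boundaries(tiles_per_image, max_chunk_size):
--     # pass 1: prefix sums of tile counts
--     acc = []
--     total = 0
--     for x in tiles_per_image:
--         total += x
--         acc.append(total)
--     # pass 2: find cut points (image index, cumulative tiles at that cut)
--     n = len(tiles_per_image)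
--     cuts = []
--     last = 0
--     for idx, a in enumerate(acc):
--         if a - last > max_chunk_size or idx == n - 1:
--             cuts.append((idx, a))
--             last = a
--     # pass 3: emit boundary pairs from consecutive cuts
--     boundaries_images = []
--     bondaries_tiles = []
--     prev_i, prev_t = -1, -1
--     for idx, a in cuts:
--         boundaries_images.append((prev_i + 1, idx))
--         bondaries_tiles.append((prev_t + 1, a))
--         prev_i, prev_t = idx, a
--     return boundaries_images, bondaries_tiles
-- ===== Notes on version B (the rewrite author's own statement) =====
-- stated objective: alternative
-- what changed: Replaces A's single accumulate-and-flush loop (which re-reads the last tuple appended to each output list) with three separate passes: build a prefix-sum table, collect cut points against it, then emit both boundary lists from consecutive cut points.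
import Mathlib
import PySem

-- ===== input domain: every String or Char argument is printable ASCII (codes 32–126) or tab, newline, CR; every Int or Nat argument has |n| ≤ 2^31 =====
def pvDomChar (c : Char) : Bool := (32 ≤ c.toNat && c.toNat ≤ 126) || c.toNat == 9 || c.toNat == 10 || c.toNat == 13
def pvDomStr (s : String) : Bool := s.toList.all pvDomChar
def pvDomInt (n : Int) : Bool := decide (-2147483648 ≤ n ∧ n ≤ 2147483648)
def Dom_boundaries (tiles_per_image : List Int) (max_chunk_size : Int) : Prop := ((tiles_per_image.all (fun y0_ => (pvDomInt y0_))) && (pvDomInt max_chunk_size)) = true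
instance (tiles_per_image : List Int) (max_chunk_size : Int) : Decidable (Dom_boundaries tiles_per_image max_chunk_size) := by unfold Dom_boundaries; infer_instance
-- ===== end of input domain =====

-- B rewrites A's single accumulate-and-flush loop as three passes (prefix sums, cut points, emission); same output, same cost.

-- ===== PORT A =====
-- `xs[-1][1]` under A's `len(xs) > 0` guard is ported as `getLast?` (exact: the list is nonempty iff getLast? is some)
def boundaries (tiles_per_image : List Int) (max_chunk_size : Int) : (List (Int × Int)) × (List (Int × Int)) :=
  let n : Int := tiles_per_image.length
  let r := (PySem.List.enumerate tiles_per_image).foldl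
    (fun (st : (List (Int × Int)) × (List (Int × Int)) × Int × Int) p =>
      let ts := st.2.2.1 + p.2
      let accu := st.2.2.2 + p.2
      if ts > max_chunk_size ∨ p.1 + 1 = n then
        (st.1 ++ [match st.1.getLast? with | some q => (q.2 + 1, p.1) | none => (0, p.1)],
         st.2.1 ++ [match st.2.1.getLast? with | some q => (q.2 + 1, accu) | none => (0, accu)],
         0, accu)
      else (st.1, st.2.1, ts, accu))
    ([], [], 0, 0)
  (r.1, r.2.1)

-- ===== PORT B =====
def boundaries_alt (tiles_per_image : List Int) (max_chunk_size : Int) : (List (Int × Int)) × (List (Int × Int)) :=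
  -- pass 1: prefix sums of tile counts
  let acc := (tiles_per_image.foldl (fun (st : List Int × Int) x => (st.1 ++ [st.2 + x], st.2 + x)) ([], 0)).1
  let n : Int := tiles_per_image.length
  -- pass 2: cut points (image index, cumulative tiles at that cut)
  let cuts := (PySem.List.enumerate acc).foldl
    (fun (st : List (Int × Int) × Int) p =>
      if p.2 - st.2 > max_chunk_size ∨ p.1 = n - 1 then (st.1 ++ [(p.1, p.2)], p.2) else st)
    ([], 0)
  -- pass 3: emit boundary pairs from consecutive cuts
  let r := cuts.1.foldl
    (fun (st : (List (Int × Int)) × (List (Int × Int)) × Int × Int) p =>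
      (st.1 ++ [(st.2.2.1 + 1, p.1)], st.2.1 ++ [(st.2.2.2 + 1, p.2)], p.1, p.2))
    ([], [], -1, -1)
  (r.1, r.2.1)

-- ===== PRECONDITION & SPEC =====
def Spec_boundaries (tiles_per_image : List Int) (max_chunk_size : Int) (out : (List (Int × Int)) × (List (Int × Int))) : Prop := out = boundaries_alt tiles_per_image max_chunk_size
instance (tiles_per_image : List Int) (max_chunk_size : Int) (out : (List (Int × Int)) × (List (Int × Int))) : Decidable (Spec_boundaries tiles_per_image max_chunk_size out) := by unfold Spec_boundaries; infer_instance

-- ===== CLAIM (what is proved, stated in full; the proofs are below) =====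
def Claim_equal_boundaries : Prop := ∀ (tiles_per_image : List Int) (max_chunk_size : Int), Dom_boundaries tiles_per_image max_chunk_size → Spec_boundaries tiles_per_image max_chunk_size (boundaries tiles_per_image max_chunk_size)

-- ===== LEMMAS AND PROOFS =====

-- reference: the list of cut records (image index, cumulative tile count at the cut)
def cutsRec (m n : Int) : List Int → Int → Int → Int → List (Int × Int)
  | [], _, _, _ => []
  | x :: rest, i, ts, a =>
    if ts + x > m ∨ i + 1 = n then (i, a + x) :: cutsRec m n rest (i + 1) 0 (a + x)
    else cutsRec m n rest (i + 1) (ts + x) (a + x)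

-- reference: turn cut records into the two boundary lists, given previous ends
def emit : List (Int × Int) → Int → Int → (List (Int × Int)) × (List (Int × Int))
  | [], _, _ => ([], [])
  | p :: rest, pi, pt =>
    ((pi + 1, p.1) :: (emit rest p.1 p.2).1, (pt + 1, p.2) :: (emit rest p.1 p.2).2)

def lastSnd (l : List (Int × Int)) : Int := match l.getLast? with | some q => q.2 | none => -1

def prefList : List Int → Int → List Int
  | [], _ => []
  | x :: r, t => (t + x) :: prefList r (t + x)

theorem match_lastSnd (l : List (Int × Int)) (i : Int) :
    (match l.getLast? with | some q => (q.2 + 1, i) | none => ((0 : Int), i)) = (lastSnd l + 1, i) := by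
  unfold lastSnd; cases l.getLast? <;> simp

theorem lastSnd_concat (l : List (Int × Int)) (q : Int × Int) : lastSnd (l ++ [q]) = q.2 := by
  simp [lastSnd]

def stepA (m n : Int) (st : (List (Int × Int)) × (List (Int × Int)) × Int × Int) (p : Int × Int) :
    (List (Int × Int)) × (List (Int × Int)) × Int × Int :=
  let ts := st.2.2.1 + p.2
  let accu := st.2.2.2 + p.2
  if ts > m ∨ p.1 + 1 = n then
    (st.1 ++ [match st.1.getLast? with | some q => (q.2 + 1, p.1) | none => (0, p.1)],
     st.2.1 ++ [match st.2.1.getLast? with | some q => (q.2 + 1, accu) | none => (0, accu)],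
     0, accu)
  else (st.1, st.2.1, ts, accu)

theorem foldA_eq (m n : Int) (rest : List Int) : ∀ (i ts a : Int) (imgs tls : List (Int × Int)),
    ((((PySem.List.enumerate rest i).foldl (stepA m n) (imgs, tls, ts, a)).1,
      ((PySem.List.enumerate rest i).foldl (stepA m n) (imgs, tls, ts, a)).2.1) :
        (List (Int × Int)) × (List (Int × Int))) =
    (imgs ++ (emit (cutsRec m n rest i ts a) (lastSnd imgs) (lastSnd tls)).1,
     tls ++ (emit (cutsRec m n rest i ts a) (lastSnd imgs) (lastSnd tls)).2) := by
  induction rest with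
  | nil => intro i ts a imgs tls; simp [PySem.List.enumerate_nil, cutsRec, emit]
  | cons x r ih =>
    intro i ts a imgs tls
    rw [PySem.List.enumerate_cons, List.foldl_cons]
    by_cases h : ts + x > m ∨ i + 1 = n
    · have hstep : stepA m n (imgs, tls, ts, a) (i, x) =
          (imgs ++ [(lastSnd imgs + 1, i)], tls ++ [(lastSnd tls + 1, a + x)], 0, a + x) := by
        simp only [stepA, if_pos h, match_lastSnd]
      rw [hstep, ih]
      simp [lastSnd_concat, cutsRec, if_pos h, emit]
    · have hstep : stepA m n (imgs, tls, ts, a) (i, x) = (imgs, tls, ts + x, a + x) := by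
        simp only [stepA]; rw [if_neg h]
      rw [hstep, ih]
      simp [cutsRec, if_neg h]

theorem foldPref_eq (l : List Int) : ∀ (pre : List Int) (t : Int),
    (l.foldl (fun (st : List Int × Int) x => (st.1 ++ [st.2 + x], st.2 + x)) (pre, t)).1
      = pre ++ prefList l t := by
  induction l with
  | nil => intro pre t; simp [prefList]
  | cons x r ih => intro pre t; simp only [List.foldl_cons, prefList]; rw [ih]; simp

theorem foldCuts_eq (m n : Int) (l : List Int) : ∀ (i a last : Int) (cs : List (Int × Int)),
    ((PySem.List.enumerate (prefList l a) i).foldl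
      (fun (st : List (Int × Int) × Int) p =>
        if p.2 - st.2 > m ∨ p.1 = n - 1 then (st.1 ++ [(p.1, p.2)], p.2) else st)
      (cs, last)).1 = cs ++ cutsRec m n l i (a - last) a := by
  induction l with
  | nil => intro i a last cs; simp [prefList, PySem.List.enumerate_nil, cutsRec]
  | cons x r ih =>
    intro i a last cs
    rw [show prefList (x :: r) a = (a + x) :: prefList r (a + x) from rfl,
        PySem.List.enumerate_cons, List.foldl_cons]
    by_cases h : (a - last) + x > m ∨ i + 1 = n
    · have h' : ((i, a + x) : Int × Int).2 - last > m ∨ ((i, a + x) : Int × Int).1 = n - 1 := by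
        simp only []; omega
      rw [if_pos h', ih]
      have e : a + x - (a + x) = (0 : Int) := by ring
      simp only [cutsRec, if_pos h, e]
      simp
    · have h' : ¬ (((i, a + x) : Int × Int).2 - last > m ∨ ((i, a + x) : Int × Int).1 = n - 1) := by
        simp only []; omega
      rw [if_neg h', ih]
      have e : a + x - last = a - last + x := by ring
      rw [e, show cutsRec m n (x :: r) i (a - last) a
            = cutsRec m n r (i + 1) (a - last + x) (a + x) from by
          simp only [cutsRec, if_neg h]]

theorem foldEmit_eq (cuts : List (Int × Int)) : ∀ (imgs tls : List (Int × Int)) (pi pt : Int),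
    (((cuts.foldl
      (fun (st : (List (Int × Int)) × (List (Int × Int)) × Int × Int) p =>
        (st.1 ++ [(st.2.2.1 + 1, p.1)], st.2.1 ++ [(st.2.2.2 + 1, p.2)], p.1, p.2))
      (imgs, tls, pi, pt)).1,
      (cuts.foldl
      (fun (st : (List (Int × Int)) × (List (Int × Int)) × Int × Int) p =>
        (st.1 ++ [(st.2.2.1 + 1, p.1)], st.2.1 ++ [(st.2.2.2 + 1, p.2)], p.1, p.2))
      (imgs, tls, pi, pt)).2.1) : (List (Int × Int)) × (List (Int × Int)))
      = (imgs ++ (emit cuts pi pt).1, tls ++ (emit cuts pi pt).2) := by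
  induction cuts with
  | nil => intro imgs tls pi pt; simp [emit]
  | cons p r ih =>
    intro imgs tls pi pt
    simp only [List.foldl_cons, emit]
    rw [ih]
    simp

-- ===== VERDICT (by name: the statement is the Claim_ definition above) =====
theorem boundaries_spec : Claim_equal_boundaries := by
  intro tpi m _
  unfold Spec_boundaries boundaries boundaries_alt
  dsimp only
  rw [show (fun (st : (List (Int × Int)) × (List (Int × Int)) × Int × Int) (p : Int × Int) =>
      let ts := st.2.2.1 + p.2
      let accu := st.2.2.2 + p.2
      if ts > m ∨ p.1 + 1 = (tpi.length : Int) then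
        (st.1 ++ [match st.1.getLast? with | some q => (q.2 + 1, p.1) | none => (0, p.1)],
         st.2.1 ++ [match st.2.1.getLast? with | some q => (q.2 + 1, accu) | none => (0, accu)],
         0, accu)
      else (st.1, st.2.1, ts, accu)) = stepA m (tpi.length : Int) from rfl]
  rw [foldPref_eq tpi [] 0, List.nil_append]
  have hC := foldCuts_eq m (tpi.length : Int) tpi 0 0 0 []
  simp only [sub_zero, List.nil_append] at hC
  rw [hC]
  have hA := foldA_eq m (tpi.length : Int) tpi 0 0 0 [] []
  have hE := foldEmit_eq (cutsRec m (tpi.length : Int) tpi 0 0 0) [] [] (-1) (-1)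
  simp only [List.nil_append] at hA hE
  rw [show lastSnd [] = (-1 : Int) from rfl] at hA
  exact hA.trans hE.symm
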